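-- pv_equiv track=rewrite | github.com/keiseiisobe/atcoder | daily_training/all-2025-04-23/C.py | solve
-- ===== SOURCE A (Python) =====
-- def separate_str(str, step):
--     new_str = []
--     for i in range(0, len(str), step):
--         new_str.append(str[i:i+step])
--     return new_str
--
-- def solve(S, T):
--     for i in range(1, len(S)):
--         str = separate_str(S, i)
--         for j in range(0, i):
--             res = []
--             for raw in range(len(str)):
--                 if len(str[raw]) <= j:
--                     break
--                 res.append(str[raw][j])
--             if T == ''.join(res):
--                 return "Yes"
--     return "No"
-- ===== SOURCE B (Python) =====
-- def solve(S, T):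
--     # Read the j-th column of the width-i grid directly as a stride walk over S:
--     # no grid is built and no row list is scanned.
--     n = len(S)
--     for i in range(1, n):
--         for j in range(i):
--             col = []
--             k = j
--             while k < n:
--                 col.append(S[k])
--                 k += i
--             if T == ''.join(col):
--                 return "Yes"
--     return "No"
-- ===== Notes on version B (the rewrite author's own statement) =====
-- stated objective: simpler
-- what changed: B drops the grid: instead of building the width-i chunk list (separate_str) and scanning it row by row with a break, B reads the j-th column directly as a stride walk over S (k = j, j+i, j+2i, ...).
import Mathlib
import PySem

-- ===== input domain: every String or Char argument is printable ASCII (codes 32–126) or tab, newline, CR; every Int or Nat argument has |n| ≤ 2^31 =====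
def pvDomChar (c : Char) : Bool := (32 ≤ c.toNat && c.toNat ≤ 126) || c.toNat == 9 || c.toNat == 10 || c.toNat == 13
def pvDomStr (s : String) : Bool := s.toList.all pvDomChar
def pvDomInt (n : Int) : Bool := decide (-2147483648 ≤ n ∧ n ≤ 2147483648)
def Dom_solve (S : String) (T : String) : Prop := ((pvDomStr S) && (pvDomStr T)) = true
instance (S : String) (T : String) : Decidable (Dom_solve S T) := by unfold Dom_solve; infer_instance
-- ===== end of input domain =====

-- B replaces A's grid (separate_str) and per-row scan by a direct stride walk over S; objective: simpler.

-- ===== PORT A =====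
-- separate_str(str, step): chunks of `step` characters, appended one slice at a time.
def separate_str (s : List Char) (step : Int) : List (List Char) :=
  (PySem.List.pyRange 0 s.length step).foldl
    (fun acc i => acc ++ [PySem.List.slice s (some i) (some (i + step))]) []

-- the `for raw in range(len(str))` loop with its break; `str[raw][j]` is pyGet? —
-- it is `some` whenever the branch is reached (the guard gives j < len r, and the caller passes 0 ≤ j).
def resLoop (rows : List (List Char)) (j : Int) : List Char :=
  match rows with
  | [] => []
  | r :: rest =>
    if (r.length : Int) ≤ j then []
    else (PySem.List.pyGet? r j).getD ' ' :: resLoop rest j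

-- the `for j in range(0, i)` loop; `T == ''.join(res)` compared on the character lists (exact).
def jLoopA (rows : List (List Char)) (T : List Char) : List Int → Bool
  | [] => false
  | j :: js => if T = resLoop rows j then true else jLoopA rows T js

-- the `for i in range(1, len(S))` loop with its early `return "Yes"`.
def iLoopA (S T : List Char) : List Int → String
  | [] => "No"
  | i :: is => if jLoopA (separate_str S i) T (PySem.List.pyRange 0 i 1) then "Yes" else iLoopA S T is

def solve (S : String) (T : String) : String :=
  iLoopA S.toList T.toList (PySem.List.pyRange 1 S.toList.length 1)

-- ===== PORT B =====
-- the `while k < n: col.append(S[k]); k += i` walk, viewed from the suffix S[k:]: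
-- consuming the head is reading S[k], dropping i-1 more is k += i (exact for i ≥ 1, the only calls made).
def strideCol (i : Nat) : List Char → List Char
  | [] => []
  | c :: rest => c :: strideCol i (rest.drop (i - 1))
termination_by l => l.length
decreasing_by simp

def jLoopB (S T : List Char) (i : Int) : List Int → Bool
  | [] => false
  | j :: js => if T = strideCol i.toNat (S.drop j.toNat) then true else jLoopB S T i js

def iLoopB (S T : List Char) : List Int → String
  | [] => "No"
  | i :: is => if jLoopB S T i (PySem.List.pyRange 0 i 1) then "Yes" else iLoopB S T is

def solve_alt (S : String) (T : String) : String :=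
  iLoopB S.toList T.toList (PySem.List.pyRange 1 S.toList.length 1)

-- ===== PRECONDITION & SPEC =====
def Spec_solve (S : String) (T : String) (out : String) : Prop := out = solve_alt S T
instance (S : String) (T : String) (out : String) : Decidable (Spec_solve S T out) := by unfold Spec_solve; infer_instance

-- ===== CLAIM (what is proved, stated in full; the proofs are below) =====
def Claim_equal_solve : Prop := ∀ (S : String) (T : String), Dom_solve S T → Spec_solve S T (solve S T)

-- ===== LEMMAS AND PROOFS =====

-- separate_str as a map over the chunk starts
lemma separate_str_eq_map (s : List Char) (step : Int) :
    separate_str s step =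
      (PySem.List.pyRange 0 s.length step).map
        (fun i => PySem.List.slice s (some i) (some (i + step))) := by
  unfold separate_str
  rw [PySem.List.foldl_append_singleton_eq_map, List.nil_append]

-- the start list of a positive-step range, peeled once
lemma pyRange_pos_cons (i len : Int) (hi : 0 < i) (hlen : 0 < len) :
    PySem.List.pyRange 0 len i = 0 :: (PySem.List.pyRange 0 (len - i) i).map (· + i) := by
  rw [PySem.List.pyRange_of_pos _ _ hi, PySem.List.pyRange_of_pos _ _ hi]
  have hd : 0 ≤ (len - 1) / i := Int.ediv_nonneg (by omega) (by omega)
  have h1 : (if (0:Int) < len then ((len - 0 + i - 1) / i).toNat else 0)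
      = ((len - 1) / i).toNat + 1 := by
    rw [if_pos hlen]
    have e : len - 0 + i - 1 = (len - 1) + 1 * i := by ring
    rw [e, Int.add_mul_ediv_right _ _ (by omega : i ≠ 0)]
    omega
  have h2 : (if (0:Int) < len - i then ((len - i - 0 + i - 1) / i).toNat else 0)
      = ((len - 1) / i).toNat := by
    by_cases h : (0:Int) < len - i
    · rw [if_pos h]
      have e : len - i - 0 + i - 1 = len - 1 := by ring
      rw [e]
    · rw [if_neg h]
      have e : (len - 1) / i = 0 := Int.ediv_eq_zero_of_lt (by omega) (by omega)
      omega
  rw [h1, h2, List.range_succ_eq_map, List.map_cons, List.map_map, List.map_map]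
  simp only [List.cons.injEq]
  refine ⟨by simp, List.map_congr_left ?_⟩
  intro k _
  simp only [Function.comp_apply, Nat.succ_eq_add_one]
  push_cast
  ring

-- chunking a nonempty list = first chunk :: chunks of the rest
lemma separate_str_cons (l : List Char) (i : Int) (hi : 1 ≤ i) (hl : l ≠ []) :
    separate_str l i = l.take i.toNat :: separate_str (l.drop i.toNat) i := by
  have hl0 : 0 < (l.length : Int) := by
    cases l with
    | nil => exact absurd rfl hl
    | cons c rest => simp only [List.length_cons]; push_cast; omega
  rw [separate_str_eq_map, separate_str_eq_map,
    pyRange_pos_cons i l.length (by omega) hl0, List.map_cons, List.map_map]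
  have hi0 : (0:Int) ≤ i := by omega
  congr 1
  · rw [zero_add, PySem.List.slice_zero_start]
    exact PySem.List.slice_to _ hi0
  · have hlen : ((l.drop i.toNat).length : Int) = max 0 ((l.length : Int) - i) := by
      simp only [List.length_drop]; omega
    by_cases hbig : (l.length : Int) ≤ i
    · have e1 : PySem.List.pyRange 0 ((l.length : Int) - i) i = [] := by
        rw [PySem.List.pyRange_of_pos _ _ (by omega : (0:Int) < i), if_neg (by omega)]
        simp
      have e2 : PySem.List.pyRange 0 (((l.drop i.toNat).length : Nat) : Int) i = [] := by
        rw [hlen, max_eq_left (by omega), PySem.List.pyRange_of_pos _ _ (by omega : (0:Int) < i),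
          if_neg (by omega)]
        simp
      rw [e1, e2]
      rfl
    · rw [show (((l.drop i.toNat).length : Nat) : Int) = (l.length : Int) - i by omega]
      refine List.map_congr_left ?_
      intro m hm
      obtain ⟨hm0, hm1, -⟩ :=
        (PySem.List.mem_pyRange_iff_of_pos (by omega : (0:Int) < i) m).mp hm
      simp only [Function.comp_apply]
      rw [PySem.List.slice_toNat _ (by omega) (by omega),
        PySem.List.slice_toNat _ (by omega) (by omega), List.drop_drop]
      have e3 : (m + i + i).toNat - (m + i).toNat = (m + i).toNat - m.toNat := by omega
      have e4 : (m + i).toNat = i.toNat + m.toNat := by omega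
      rw [e3, e4]

-- A's column extraction = B's stride walk
lemma resLoop_eq_strideCol (i j : Int) (hi : 1 ≤ i) (hj : 0 ≤ j) (hji : j < i)
    (l : List Char) :
    resLoop (separate_str l i) j = strideCol i.toNat (l.drop j.toNat) := by
  generalize hn : l.length = n
  induction n using Nat.strong_induction_on generalizing l with
  | _ n ih =>
  cases l with
  | nil =>
    have h0 : separate_str ([] : List Char) i = [] := by
      rw [separate_str_eq_map]
      rw [show ((([] : List Char).length : Nat) : Int) = 0 by simp,
        PySem.List.pyRange_of_pos _ _ (by omega : (0:Int) < i), if_neg (by omega)]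
      simp
    simp [h0, resLoop, strideCol]
  | cons c rest =>
    simp only [List.length_cons] at hn
    rw [separate_str_cons _ _ hi (by simp)]
    by_cases hcase : (((c :: rest).length : Nat) : Int) ≤ j
    · simp only [List.length_cons] at hcase
      push_cast at hcase
      rw [resLoop, if_pos (by simp only [List.length_take, List.length_cons]; push_cast; omega)]
      rw [List.drop_eq_nil_of_le (by simp only [List.length_cons]; omega)]
      simp [strideCol]
    · simp only [List.length_cons] at hcase
      push_cast at hcase
      rw [not_le] at hcase
      have hjn : j.toNat < (c :: rest).length := by
        simp only [List.length_cons]; omega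
      have hji' : j.toNat < i.toNat := by omega
      have hget : PySem.List.pyGet? ((c :: rest).take i.toNat) j
          = some ((c :: rest)[j.toNat]'hjn) := by
        conv_lhs => rw [show j = ((j.toNat : Nat) : Int) by omega]
        rw [PySem.List.pyGet?_natCast, List.getElem?_take_of_lt hji',
          List.getElem?_eq_getElem hjn]
      rw [resLoop,
        if_neg (by simp only [List.length_take, List.length_cons]; push_cast; omega), hget]
      simp only [Option.getD_some]
      rw [List.drop_eq_getElem_cons hjn, strideCol]
      congr 1
      have hm : ((c :: rest).drop i.toNat).length < n := by
        simp only [List.length_drop, List.length_cons]; omega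
      have ihr := ih _ hm ((c :: rest).drop i.toNat) rfl
      rw [ihr, List.drop_drop, List.drop_drop]
      rw [show i.toNat + j.toNat = j.toNat + 1 + (i.toNat - 1) by omega]
lemma jLoop_eq (S T : List Char) (i : Int) (hi : 1 ≤ i) (js : List Int)
    (hjs : ∀ j ∈ js, 0 ≤ j ∧ j < i) :
    jLoopA (separate_str S i) T js = jLoopB S T i js := by
  induction js with
  | nil => rfl
  | cons j js ih =>
    obtain ⟨h0, h1⟩ := hjs j (by simp)
    simp only [jLoopA, jLoopB, resLoop_eq_strideCol i j hi h0 h1 S,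
      ih (fun j hj => hjs j (by simp [hj]))]

lemma iLoop_eq (S T : List Char) (is : List Int) (his : ∀ i ∈ is, 1 ≤ i) :
    iLoopA S T is = iLoopB S T is := by
  induction is with
  | nil => rfl
  | cons i is ih =>
    have hi : 1 ≤ i := his i (by simp)
    simp only [iLoopA, iLoopB,
      jLoop_eq S T i hi _ (fun j hj => by
        rw [PySem.List.mem_pyRange_one] at hj; exact hj),
      ih (fun i hi => his i (by simp [hi]))]

-- ===== VERDICT (by name: the statement is the Claim_ definition above) =====
theorem solve_spec : Claim_equal_solve := by
  intro S T _
  show solve S T = solve_alt S T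
  unfold solve solve_alt
  exact iLoop_eq _ _ _ (fun i hi => ((PySem.List.mem_pyRange_one).mp hi).1)
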